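-- pv_equiv track=rewrite | github.com/tkdalsss/CTS | Implementation/BestSet.py | solution
-- ===== SOURCE A (Python) =====
-- def solution(n, s):
--     answer = []
--
--     if n > s: return [-1]
--
--     mid = s // n
--     for _ in range(n):
--         answer.append(mid) # [4, 4]
--
--     idx = len(answer) - 1
--     for _ in range(s % n):
--         answer[idx] += 1 # [4, 5]
--         idx -= 1
--
--     return answer
-- ===== SOURCE B (Python) =====
-- def solution(n, s):
--     if n > s:
--         return [-1]
--     # greedy: the smallest part of a balanced split of t into k parts is t // k;
--     # emit it and distribute the rest over the remaining k - 1 parts.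
--     answer = []
--     k, t = n, s
--     while k > 0:
--         x = t // k
--         answer.append(x)
--         t -= x
--         k -= 1
--     return answer
-- ===== Notes on version B (the rewrite author's own statement) =====
-- stated objective: alternative
-- what changed: B replaces A's two staged passes (fill n copies of s//n, then patch the last s%n slots backwards in place) by a greedy single loop with no modulus at all: it emits t//k as the smallest remaining part and continues with (k-1, t - t//k), so each element is produced once, front to back.
import Mathlib
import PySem

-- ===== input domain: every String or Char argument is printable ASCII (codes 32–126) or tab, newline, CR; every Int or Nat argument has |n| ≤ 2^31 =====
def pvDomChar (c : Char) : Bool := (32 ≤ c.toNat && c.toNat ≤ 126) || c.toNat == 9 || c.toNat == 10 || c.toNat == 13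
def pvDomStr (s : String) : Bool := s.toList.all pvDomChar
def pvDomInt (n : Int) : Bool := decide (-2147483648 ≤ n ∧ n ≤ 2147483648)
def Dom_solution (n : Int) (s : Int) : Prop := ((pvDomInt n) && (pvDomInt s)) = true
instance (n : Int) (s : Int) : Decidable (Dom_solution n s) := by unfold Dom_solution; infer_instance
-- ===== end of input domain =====

-- B replaces A's fill-then-backward-patch passes by a greedy single loop (emit t//k, continue with k-1 parts); objective: alternative.


-- ===== PORT A =====
-- 'answer[idx] += 1' ported with pyGetD/pySetD; inside Pre_ the index is always in range
def solution (n : Int) (s : Int) : List Int :=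
  if n > s then [-1]
  else
    let mid := PySem.Int.floordiv s n
    let answer := (PySem.List.pyRange 0 n 1).foldl (fun ans _ => ans ++ [mid]) []
    let idx : Int := (answer.length : Int) - 1
    let res := (PySem.List.pyRange 0 (PySem.Int.mod s n) 1).foldl
      (fun (st : List Int × Int) _ =>
        (PySem.List.pySetD st.1 st.2 (PySem.List.pyGetD st.1 st.2 0 + 1), st.2 - 1))
      (answer, idx)
    res.1

-- ===== PORT B =====
-- B's greedy while-loop: emit t//k, continue with (k-1, t - t//k), accumulating answer
def solAltLoop (k : Int) (t : Int) (answer : List Int) : List Int :=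
  if k > 0 then
    solAltLoop (k - 1) (t - PySem.Int.floordiv t k) (answer ++ [PySem.Int.floordiv t k])
  else answer
termination_by k.toNat
decreasing_by omega

def solution_alt (n : Int) (s : Int) : List Int :=
  if n > s then [-1]
  else solAltLoop n s []

-- ===== PRECONDITION & SPEC =====
-- Pre_ excludes exactly n = 0 with 0 ≤ s, where A raises ZeroDivisionError (s // n)
def Pre_solution (n : Int) (s : Int) : Prop := ¬ (n = 0 ∧ 0 ≤ s)
instance (n : Int) (s : Int) : Decidable (Pre_solution n s) := by unfold Pre_solution; infer_instance
def pvWitness_solution : Int × Int := (2, 5)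

def Spec_solution (n : Int) (s : Int) (out : List Int) : Prop := out = solution_alt n s
instance (n : Int) (s : Int) (out : List Int) : Decidable (Spec_solution n s out) := by unfold Spec_solution; infer_instance

-- ===== CLAIM (what is proved, stated in full; the proofs are below) =====
def Claim_equal_solution : Prop := ∀ (n : Int) (s : Int), Dom_solution n s → Pre_solution n s → Spec_solution n s (solution n s)

-- ===== LEMMAS AND PROOFS =====

-- A's first loop builds init ++ replicate (length) mid
theorem pv_fill_loop {α β : Type} (q : α) (l : List β) (init : List α) :
    l.foldl (fun ans _ => ans ++ [q]) init = init ++ List.replicate l.length q := by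
  induction l generalizing init with
  | nil => simp
  | cons x xs ih => simp [List.foldl, ih, List.replicate_succ]

-- a fold whose function ignores the elements is an iterate
theorem pv_foldl_ignore {α β : Type} (g : α → α) (l : List β) (init : α) :
    l.foldl (fun st _ => g st) init = g^[l.length] init := by
  induction l generalizing init with
  | nil => rfl
  | cons x xs ih => simp [List.foldl, ih, Function.iterate_succ_apply]

-- one step of A's patch loop on the invariant shape
theorem pv_step (q : Int) (a k : Nat) (ha : 1 ≤ a) :
    PySem.List.pySetD (List.replicate a q ++ List.replicate k (q+1)) ((a : Int) - 1)
      (PySem.List.pyGetD (List.replicate a q ++ List.replicate k (q+1)) ((a : Int) - 1) 0 + 1)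
    = List.replicate (a-1) q ++ List.replicate (k+1) (q+1) := by
  obtain ⟨a', rfl⟩ : ∃ a', a = a' + 1 := ⟨a - 1, by omega⟩
  have h1 : (((a' + 1 : Nat) : Int) - 1) = ((a' : Nat) : Int) := by push_cast; ring
  rw [h1, PySem.List.pyGetD_natCast, PySem.List.pySetD_natCast]
  have hget : (List.replicate (a'+1) q ++ List.replicate k (q+1)).getD a' 0 = q := by
    simp [List.getD, List.getElem?_append_left]
  rw [hget]
  rw [List.replicate_succ' (n := a'), List.append_assoc]
  rw [List.set_append_right _ _ (by simp)]
  simp [List.replicate_succ]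

-- the patch loop iterated j times
theorem pv_iter (q : Int) (N j : Nat) (hj : j ≤ N) :
    (fun (st : List Int × Int) =>
      (PySem.List.pySetD st.1 st.2 (PySem.List.pyGetD st.1 st.2 0 + 1), st.2 - 1))^[j]
      (List.replicate N q, ((N : Int) - 1))
    = (List.replicate (N-j) q ++ List.replicate j (q+1), ((N : Int) - 1 - j)) := by
  induction j with
  | zero => simp
  | succ j ih =>
    rw [Function.iterate_succ_apply', ih (by omega)]
    have h1 : ((N : Int) - 1 - j) = ((N - j : Nat) : Int) - 1 := by
      push_cast [Nat.cast_sub (by omega : j ≤ N)]; ring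
    rw [h1]
    dsimp only
    rw [pv_step q (N - j) j (by omega)]
    have h2 : N - j - 1 = N - (j + 1) := by omega
    have h3 : ((N - j : Nat) : Int) - 1 - 1 = (N : Int) - 1 - ((j : Nat) + 1 : Nat) := by
      push_cast [Nat.cast_sub (by omega : j ≤ N)]; ring
    rw [h2, h3]

-- B's greedy loop produces the balanced split shape
theorem pv_rec_shape (N : Nat) (q r : Int) (acc : List Int) (hr0 : 0 ≤ r) (hrN : r < N) :
    solAltLoop (N : Int) (q * N + r) acc
    = acc ++ (List.replicate (N - r.toNat) q ++ List.replicate r.toNat (q + 1)) := by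
  induction N generalizing q r acc with
  | zero => omega
  | succ M ih =>
    have hNpos : (0 : Int) < (M + 1 : Nat) := by positivity
    rw [solAltLoop]
    rw [if_pos (by push_cast; omega)]
    have hdiv : PySem.Int.floordiv (q * (M+1 : Nat) + r) ((M+1 : Nat) : Int) = q := by
      rw [PySem.Int.floordiv_eq_iff_of_pos hNpos]
      constructor <;> nlinarith
    rw [hdiv]
    have hrest : q * ((M+1 : Nat) : Int) + r - q = q * (M : Nat) + r := by push_cast; ring
    have hk : ((M + 1 : Nat) : Int) - 1 = ((M : Nat) : Int) := by push_cast; ring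
    rw [hrest, hk]
    by_cases hrM : r < M
    · rw [ih q r _ hr0 hrM]
      have : (M + 1) - r.toNat = ((M - r.toNat) + 1) := by omega
      rw [this, List.replicate_succ]
      simp
    · -- r = M: the remainder turns all remaining parts into q + 1
      have hrM' : r = (M : Int) := by omega
      rcases Nat.eq_zero_or_pos M with hM0 | hMpos
      · subst hM0
        have : r = 0 := by omega
        subst this
        rw [solAltLoop]
        simp
      · have hre : q * (M : Nat) + r = (q + 1) * (M : Nat) + 0 := by
          rw [hrM']; ring
        rw [hre, ih (q+1) 0 _ le_rfl (by exact_mod_cast hMpos)]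
        have h2 : r.toNat = M := by omega
        simp [h2, List.replicate_succ]

-- ===== VERDICT (by name: the statement is the Claim_ definition above) =====
theorem solution_spec : Claim_equal_solution := by
  intro n s _ hpre
  unfold Spec_solution solution solution_alt
  by_cases hgt : n > s
  · simp [hgt]
  · simp only [if_neg hgt]
    by_cases hn : 0 < n
    · set q := PySem.Int.floordiv s n with hq
      set r := PySem.Int.mod s n with hrdef
      have hr0 : 0 ≤ r := PySem.Int.mod_nonneg s hn
      have hrn : r < n := PySem.Int.mod_lt s hn
      have hsum : q * n + r = s := PySem.Int.floordiv_mul_add_mod s n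
      rw [pv_fill_loop, pv_foldl_ignore]
      simp only [List.nil_append, PySem.List.length_pyRange_one, List.length_replicate]
      have h1 : (n - 0).toNat = n.toNat := by omega
      have h2 : (r - 0).toNat = r.toNat := by omega
      rw [h1, h2]
      rw [pv_iter q n.toNat r.toNat (by omega)]
      have hncast : ((n.toNat : Int)) = n := by omega
      have := pv_rec_shape n.toNat q r [] hr0 (by omega)
      rw [hncast, hsum] at this
      rw [this, List.nil_append]
    · have hneg : n < 0 := by
        rcases lt_or_eq_of_le (not_lt.mp hn) with h | h
        · exact h
        · exact absurd ⟨h, by omega⟩ hpre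
      have hmod := PySem.Int.mod_neg_bounds s (b := n) hneg
      rw [PySem.List.pyRange_one_eq_nil (a := 0) (b := n) (by omega)]
      rw [PySem.List.pyRange_one_eq_nil (a := 0) (by omega : PySem.Int.mod s n ≤ 0)]
      rw [solAltLoop, if_neg (by omega)]
      simp
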